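-- pv_equiv track=rewrite | github.com/pstabell/MPT-CRM | esign_sharepoint_service.py | _sanitize_folder_name
-- ===== SOURCE A (Python) =====
-- def _sanitize_folder_name(name: str) -> str:
--     """Sanitize folder name for SharePoint compatibility"""
--     if not name:
--         return "General"
--
--     # Replace invalid characters
--     invalid_chars = ['<', '>', ':', '"', '|', '?', '*', '\\', '/', '&']
--     sanitized = name
--     for char in invalid_chars:
--         sanitized = sanitized.replace(char, '_')
--
--     # Remove leading/trailing spaces and periods
--     sanitized = sanitized.strip(' .')
--
--     # Ensure not empty
--     return sanitized if sanitized else "General"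
-- ===== SOURCE B (Python) =====
-- def _sanitize_folder_name(name: str) -> str:
--     """Sanitize folder name for SharePoint compatibility"""
--     if not name:
--         return "General"
--
--     # Single pass over the input with a set-membership test
--     invalid = set('<>:"|?*\\/&')
--     sanitized = ''.join('_' if c in invalid else c for c in name)
--
--     sanitized = sanitized.strip(' .')
--     return sanitized if sanitized else "General"
-- ===== Notes on version B (the rewrite author's own statement) =====
-- stated objective: idiomatic
-- what changed: A loops over the ten invalid characters, rescanning and rebuilding the whole string once per character (ten full replace passes); B makes a single pass over the input string, substituting the placeholder on a set-membership test, so the traversal is over the input once instead of ten rebuilds.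
import Mathlib
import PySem

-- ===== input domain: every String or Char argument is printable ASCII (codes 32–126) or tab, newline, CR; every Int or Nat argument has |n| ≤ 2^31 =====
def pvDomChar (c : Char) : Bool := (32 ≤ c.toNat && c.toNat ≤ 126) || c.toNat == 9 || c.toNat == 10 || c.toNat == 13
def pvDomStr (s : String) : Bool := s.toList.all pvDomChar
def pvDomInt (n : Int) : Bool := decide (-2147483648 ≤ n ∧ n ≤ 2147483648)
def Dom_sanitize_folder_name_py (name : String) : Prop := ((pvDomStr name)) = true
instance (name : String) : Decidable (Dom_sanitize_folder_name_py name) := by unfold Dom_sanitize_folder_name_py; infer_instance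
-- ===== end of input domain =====

-- B replaces A's ten whole-string replace passes by one pass over the input with a set-membership test (idiomatic; same result).

-- ===== PORT A =====
def sanitize_folder_name_py (name : String) : String :=
  if name = "" then "General"
  else
    let invalid_chars : List String := ["<", ">", ":", "\"", "|", "?", "*", "\\", "/", "&"]
    let sanitized := invalid_chars.foldl (fun acc ch => PySem.Str.replace acc ch "_") name
    let sanitized := PySem.Str.stripChars sanitized " ."
    if sanitized = "" then "General" else sanitized

-- ===== PORT B =====
-- invalid = set('<>:"|?*\/&')
def pvInvalidSet : PySem.Set Char := PySem.Set.ofList "<>:\"|?*\\/&".toList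

def sanitize_folder_name_py_alt (name : String) : String :=
  if name = "" then "General"
  else
    let sanitized := String.ofList (name.toList.map (fun c => if c ∈ pvInvalidSet then '_' else c))
    let sanitized := PySem.Str.stripChars sanitized " ."
    if sanitized = "" then "General" else sanitized

-- ===== PRECONDITION & SPEC =====
def Spec_sanitize_folder_name_py (name : String) (out : String) : Prop := out = sanitize_folder_name_py_alt name
instance (name : String) (out : String) : Decidable (Spec_sanitize_folder_name_py name out) := by unfold Spec_sanitize_folder_name_py; infer_instance

-- ===== CLAIM (what is proved, stated in full; the proofs are below) =====
def Claim_equal_sanitize_folder_name_py : Prop := ∀ (name : String), Dom_sanitize_folder_name_py name → Spec_sanitize_folder_name_py name (sanitize_folder_name_py name)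

-- ===== LEMMAS AND PROOFS =====

-- single-character substitution, as one step of A's replace chain performs it
def pvSub (a c : Char) : Char := if c = a then '_' else c

theorem pvReplaceGo_single (a : Char) (l : List Char) (fuel : Nat) (acc : List Char)
    (h : l.length ≤ fuel) :
    PySem.Chars.replace.go [a] ['_'] fuel l acc = acc.reverse ++ l.map (pvSub a) := by
  induction l generalizing fuel acc with
  | nil =>
      cases fuel <;> simp [PySem.Chars.replace.go]
  | cons c t ih =>
      cases fuel with
      | zero => simp at h
      | succ f =>
        simp only [PySem.Chars.replace.go, List.isPrefixOf_cons₂, List.isPrefixOf_nil_left,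
          Bool.and_true]
        by_cases hca : a = c
        · subst hca
          simp only [beq_self_eq_true, if_true]
          have hd : List.drop [a].length (a :: t) = t := rfl
          rw [hd, ih _ _ (by simpa using Nat.le_of_succ_le_succ h)]
          simp [pvSub]
        · have : (a == c) = false := by simp [hca]
          rw [this]
          simp only [Bool.false_eq_true, if_false]
          rw [ih _ _ (by simpa using Nat.le_of_succ_le_succ h)]
          simp [pvSub, Ne.symm hca]

theorem pvReplace_single (a : Char) (l : List Char) :
    PySem.Chars.replace l [a] ['_'] = l.map (pvSub a) := by
  rw [PySem.Chars.replace]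
  simp [pvReplaceGo_single a l l.length [] (le_refl _)]

theorem pvSub_chain (c : Char) :
    pvSub '&' (pvSub '/' (pvSub '\\' (pvSub '*' (pvSub '?' (pvSub '|' (pvSub '"' (pvSub ':'
      (pvSub '>' (pvSub '<' c))))))))) = (if c ∈ pvInvalidSet then '_' else c) := by
  have hmem : c ∈ pvInvalidSet ↔ c ∈ (['<', '>', ':', '"', '|', '?', '*', '\\', '/', '&'] : List Char) := by
    rw [pvInvalidSet, PySem.Set.mem_ofList]
    exact Iff.rfl
  by_cases h : c ∈ pvInvalidSet
  · have h2 := hmem.mp h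
    fin_cases h2 <;> rfl
  · have h' := fun hc => h (hmem.mpr hc)
    simp only [List.mem_cons, List.not_mem_nil, or_false, imp_false, not_or] at h'
    obtain ⟨h1, h2, h3, h4, h5, h6, h7, h8, h9, h10⟩ := h'
    simp [pvSub, h1, h2, h3, h4, h5, h6, h7, h8, h9, h10, h]

theorem pvSanitized_eq (name : String) :
    (["<", ">", ":", "\"", "|", "?", "*", "\\", "/", "&"] : List String).foldl
        (fun acc ch => PySem.Str.replace acc ch "_") name
      = String.ofList (name.toList.map (fun c => if c ∈ pvInvalidSet then '_' else c)) := by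
  have h : ((["<", ">", ":", "\"", "|", "?", "*", "\\", "/", "&"] : List String).foldl
        (fun acc ch => PySem.Str.replace acc ch "_") name).toList
      = name.toList.map (fun c => if c ∈ pvInvalidSet then '_' else c) := by
    simp only [List.foldl_cons, List.foldl_nil, PySem.Str.toList_replace,
      show ("<" : String).toList = ['<'] from rfl, show (">" : String).toList = ['>'] from rfl,
      show (":" : String).toList = [':'] from rfl, show ("\"" : String).toList = ['"'] from rfl,
      show ("|" : String).toList = ['|'] from rfl, show ("?" : String).toList = ['?'] from rfl,
      show ("*" : String).toList = ['*'] from rfl, show ("\\" : String).toList = ['\\'] from rfl,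
      show ("/" : String).toList = ['/'] from rfl, show ("&" : String).toList = ['&'] from rfl,
      show ("_" : String).toList = ['_'] from rfl,
      pvReplace_single, List.map_map]
    refine List.map_congr_left (fun c _ => ?_)
    simp only [Function.comp_apply]
    exact pvSub_chain c
  rw [← h, String.ofList_toList]

-- ===== VERDICT (by name: the statement is the Claim_ definition above) =====
theorem sanitize_folder_name_py_spec : Claim_equal_sanitize_folder_name_py := by
  intro name _
  unfold Spec_sanitize_folder_name_py sanitize_folder_name_py sanitize_folder_name_py_alt
  by_cases hn : name = ""
  · simp [hn]
  · simp only [hn, if_false]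
    rw [pvSanitized_eq name]
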